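-- pv_equiv track=rewrite | github.com/TaimurKhaliq/workspace-control | workspace_control/propose.py | _remove_parent_folders_with_files
-- ===== SOURCE A (Python) =====
-- from collections.abc import Sequence
--
-- def _remove_parent_folders_with_files(
--     folders: Sequence[str],
--     files: Sequence[str],
-- ) -> list[str]:
--     if not files:
--         return list(folders)
--     return [
--         folder
--         for folder in folders
--         if not any(file_path.startswith(f"{folder}/") for file_path in files)
--     ]
-- ===== SOURCE B (Python) =====
-- def _remove_parent_folders_with_files(folders, files):
--     # Precompute every ancestor-directory prefix of every file (text before each '/'),
--     # then keep only folders not in that set.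
--     parents = set()
--     for file_path in files:
--         for i, ch in enumerate(file_path):
--             if ch == '/':
--                 parents.add(file_path[:i])
--     return [folder for folder in folders if folder not in parents]
-- ===== Notes on version B (the rewrite author's own statement) =====
-- stated objective: faster
-- what changed: Instead of scanning all files for each folder, B builds once the set of all ancestor-directory prefixes of the files and filters folders by a single set-membership test.
import Mathlib
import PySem

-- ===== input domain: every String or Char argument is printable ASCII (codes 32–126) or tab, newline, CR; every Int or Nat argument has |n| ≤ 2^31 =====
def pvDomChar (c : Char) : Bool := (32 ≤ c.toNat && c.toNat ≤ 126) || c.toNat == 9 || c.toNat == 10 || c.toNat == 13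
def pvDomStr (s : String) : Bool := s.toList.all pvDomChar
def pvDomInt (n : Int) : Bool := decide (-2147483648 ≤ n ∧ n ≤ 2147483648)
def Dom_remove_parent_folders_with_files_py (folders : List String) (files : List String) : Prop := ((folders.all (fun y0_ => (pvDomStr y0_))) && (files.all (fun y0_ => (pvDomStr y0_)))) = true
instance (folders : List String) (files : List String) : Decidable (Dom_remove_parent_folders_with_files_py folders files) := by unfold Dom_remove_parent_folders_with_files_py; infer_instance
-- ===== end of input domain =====

-- B replaces A's folders×files scan by one precomputed set of the files' ancestor-directory prefixes (faster).

-- ===== PORT A =====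
def remove_parent_folders_with_files_py (folders : List String) (files : List String) : List String :=
  if files = [] then folders
  else folders.filter (fun folder =>
    !(files.any (fun file_path => PySem.Str.startswith file_path (folder ++ "/"))))

-- ===== PORT B =====
def remove_parent_folders_with_files_py_alt (folders : List String) (files : List String) : List String :=
  let parents : PySem.Set String :=
    files.foldl (fun s file_path =>
      (PySem.List.enumerate file_path.toList).foldl (fun s p =>
        if p.2 = '/' then PySem.Set.add s (PySem.Str.slice file_path none (some p.1)) else s) s)
      PySem.Set.empty
  folders.filter (fun folder => !(PySem.Set.contains parents folder))

-- ===== PRECONDITION & SPEC =====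
def Spec_remove_parent_folders_with_files_py (folders : List String) (files : List String) (out : List String) : Prop := out = remove_parent_folders_with_files_py_alt folders files
instance (folders : List String) (files : List String) (out : List String) : Decidable (Spec_remove_parent_folders_with_files_py folders files out) := by unfold Spec_remove_parent_folders_with_files_py; infer_instance

-- ===== CLAIM (what is proved, stated in full; the proofs are below) =====
def Claim_equal_remove_parent_folders_with_files_py : Prop := ∀ (folders : List String) (files : List String), Dom_remove_parent_folders_with_files_py folders files → Spec_remove_parent_folders_with_files_py folders files (remove_parent_folders_with_files_py folders files)

-- ===== LEMMAS AND PROOFS =====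

-- membership in a conditional-add fold over a list
theorem mem_foldl_add_if {α β : Type} [BEq α] [LawfulBEq α] (ps : List β) (P : β → Prop)
    [DecidablePred P] (f : β → α) (s0 : PySem.Set α) (x : α) :
    x ∈ ps.foldl (fun s p => if P p then PySem.Set.add s (f p) else s) s0 ↔
      x ∈ s0 ∨ ∃ p ∈ ps, P p ∧ f p = x := by
  induction ps generalizing s0 with
  | nil => simp
  | cons q qs ih =>
    simp only [List.foldl_cons]
    rw [ih]
    by_cases hq : P q
    · rw [if_pos hq]
      simp only [PySem.Set.mem_add, List.mem_cons]
      constructor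
      · rintro ((h | h) | ⟨p, hp, h1, h2⟩)
        · exact Or.inl h
        · exact Or.inr ⟨q, Or.inl rfl, hq, h.symm⟩
        · exact Or.inr ⟨p, Or.inr hp, h1, h2⟩
      · rintro (h | ⟨p, rfl | hp, h1, h2⟩)
        · exact Or.inl (Or.inl h)
        · exact Or.inl (Or.inr h2.symm)
        · exact Or.inr ⟨p, hp, h1, h2⟩
    · rw [if_neg hq]
      simp only [List.mem_cons]
      constructor
      · rintro (h | ⟨p, hp, h1, h2⟩)
        · exact Or.inl h
        · exact Or.inr ⟨p, Or.inr hp, h1, h2⟩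
      · rintro (h | ⟨p, rfl | hp, h1, h2⟩)
        · exact Or.inl h
        · exact absurd h1 hq
        · exact Or.inr ⟨p, hp, h1, h2⟩

-- prefixes-at-'/' characterisation: some cut of l at a '/' equals t iff t ++ "/" is a prefix of l
theorem cut_iff_prefix (l : List Char) (t : List Char) :
    (∃ (k : Nat), ∃ (h : k < l.length), l[k] = '/' ∧ l.take k = t) ↔ (t ++ ['/']) <+: l := by
  constructor
  · rintro ⟨k, hk, hc, ht⟩
    have h1 : l.take (k + 1) = t ++ ['/'] := by
      rw [List.take_add_one, ht]
      simp [List.getElem?_eq_getElem hk, hc]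
    rw [← h1]
    exact List.take_prefix _ _
  · rintro ⟨r, hr⟩
    subst hr
    refine ⟨t.length, by simp, ?_, ?_⟩
    · rw [List.getElem_append_left (by simp), List.getElem_concat_length rfl]
    · rw [List.append_assoc]
      exact List.take_left
-- Python file_path[:i] for 0 ≤ i is exactly take i (PySem.List.slice_to)
theorem slice_toList (fp : String) (k : Nat) :
    (PySem.Str.slice fp none (some ((0 : Int) + k))).toList = fp.toList.take k := by
  simp [PySem.List.slice_to]

-- membership in the inner (per-file) fold
theorem mem_inner_fold (file_path : String) (s0 : PySem.Set String) (x : String) :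
    x ∈ (PySem.List.enumerate file_path.toList).foldl (fun s p =>
        if p.2 = '/' then PySem.Set.add s (PySem.Str.slice file_path none (some p.1)) else s) s0 ↔
      x ∈ s0 ∨ PySem.Str.startswith file_path (x ++ "/") = true := by
  rw [mem_foldl_add_if]
  simp only [PySem.Str.startswith_eq, PySem.Chars.startswith_iff]
  have htl : (x ++ "/").toList = x.toList ++ ['/'] := by simp
  rw [htl, ← cut_iff_prefix]
  constructor
  · rintro (h | ⟨p, hp, h1, h2⟩)
    · exact Or.inl h
    · rw [PySem.List.mem_enumerate_iff] at hp
      obtain ⟨k, hk, rfl⟩ := hp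
      refine Or.inr ⟨k, hk, h1, ?_⟩
      rw [← slice_toList file_path k]
      exact congrArg String.toList h2
  · rintro (h | ⟨k, hk, hc, ht⟩)
    · exact Or.inl h
    · refine Or.inr ⟨((0 : Int) + k, file_path.toList[k]), ?_, hc, ?_⟩
      · rw [PySem.List.mem_enumerate_iff]; exact ⟨k, hk, rfl⟩
      · apply String.toList_injective
        rw [slice_toList file_path k]
        exact ht

-- membership in the whole parents set
theorem mem_parents (files : List String) (s0 : PySem.Set String) (x : String) :
    x ∈ files.foldl (fun s file_path =>
        (PySem.List.enumerate file_path.toList).foldl (fun s p =>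
          if p.2 = '/' then PySem.Set.add s (PySem.Str.slice file_path none (some p.1)) else s) s)
        s0 ↔
      x ∈ s0 ∨ files.any (fun file_path => PySem.Str.startswith file_path (x ++ "/")) = true := by
  induction files generalizing s0 with
  | nil => simp
  | cons f fs ih =>
    simp only [List.foldl_cons, ih, mem_inner_fold, List.any_cons, Bool.or_eq_true]
    tauto

-- ===== VERDICT (by name: the statement is the Claim_ definition above) =====
theorem remove_parent_folders_with_files_py_spec : Claim_equal_remove_parent_folders_with_files_py := by
  intro folders files _
  unfold Spec_remove_parent_folders_with_files_py
  unfold remove_parent_folders_with_files_py remove_parent_folders_with_files_py_alt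
  have hfilter : folders.filter (fun folder =>
      !(files.any (fun file_path => PySem.Str.startswith file_path (folder ++ "/")))) =
      folders.filter (fun folder => !(PySem.Set.contains
        (files.foldl (fun s file_path =>
          (PySem.List.enumerate file_path.toList).foldl (fun s p =>
            if p.2 = '/' then PySem.Set.add s (PySem.Str.slice file_path none (some p.1)) else s) s)
          PySem.Set.empty) folder)) := by
    apply List.filter_congr
    intro folder _
    congr 1
    rw [Bool.eq_iff_iff]
    rw [PySem.Set.contains_iff, mem_parents]
    simp [PySem.Set.empty]
  split_ifs with hf
  · subst hf; simp
  · exact hfilter
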